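-- pv_equiv track=rewrite | github.com/YukunQu/DCM | analysis/mri/event/event_cv.py | _split_corr_trials
-- ===== SOURCE A (Python) =====
-- def _split_corr_trials(trial_corr):
--     i = 0
--     trial_label = []
--     for tc in trial_corr:
--         if tc:
--             i += 1
--             if i % 2 == 0:
--                 trial_label.append('even')
--             else:
--                 trial_label.append('odd')
--         else:
--             trial_label.append('error')
--     return trial_label
-- ===== SOURCE B (Python) =====
-- def _split_corr_trials(trial_corr):
--     # two-pass: materialise trials once, build a prefix table of correct counts,
--     # then map labels off the table
--     trials = list(trial_corr)
--     counts = []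
--     c = 0
--     for tc in trials:
--         c += 1 if tc else 0
--         counts.append(c)
--     return ['error' if not tc else ('even' if c % 2 == 0 else 'odd')
--             for tc, c in zip(trials, counts)]
-- ===== Notes on version B (the rewrite author's own statement) =====
-- stated objective: alternative
-- what changed: Replaced A's single loop carrying a running correctness counter with a two-pass decomposition: first build a prefix table of cumulative correct counts, then map labels over the zipped trials and table.
import Mathlib
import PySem

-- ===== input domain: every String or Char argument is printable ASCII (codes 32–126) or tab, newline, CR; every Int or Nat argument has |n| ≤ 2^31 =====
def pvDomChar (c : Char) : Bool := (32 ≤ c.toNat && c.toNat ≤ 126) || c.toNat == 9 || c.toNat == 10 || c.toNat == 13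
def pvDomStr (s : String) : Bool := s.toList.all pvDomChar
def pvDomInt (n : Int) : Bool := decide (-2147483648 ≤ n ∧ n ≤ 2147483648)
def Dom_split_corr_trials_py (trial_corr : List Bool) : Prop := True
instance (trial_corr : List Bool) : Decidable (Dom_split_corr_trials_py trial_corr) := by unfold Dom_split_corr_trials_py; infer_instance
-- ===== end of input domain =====

-- B replaces A's single accumulator loop with a prefix-count table plus a map pass (alternative decomposition, same cost).

-- ===== PORT A =====
-- single loop carrying (i, trial_label)
def split_corr_trials_py (trial_corr : List Bool) : List String :=
  (trial_corr.foldl (fun (st : Int × List String) tc =>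
      if tc then
        let i := st.1 + 1
        (i, st.2 ++ [if i % 2 == 0 then "even" else "odd"])
      else
        (st.1, st.2 ++ ["error"])) ((0 : Int), ([] : List String))).2

-- ===== PORT B =====
-- pass 1: prefix table of cumulative correct counts
def pvPrefixCounts (trials : List Bool) : List Int :=
  (trials.foldl (fun (st : Int × List Int) tc =>
      let c := st.1 + (if tc then 1 else 0)
      (c, st.2 ++ [c])) ((0 : Int), ([] : List Int))).2

-- pass 2: map labels over the zipped trials and table
def split_corr_trials_py_alt (trial_corr : List Bool) : List String :=
  (trial_corr.zip (pvPrefixCounts trial_corr)).map (fun p =>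
    if !p.1 then "error" else if p.2 % 2 == 0 then "even" else "odd")

-- ===== PRECONDITION & SPEC =====
def Spec_split_corr_trials_py (trial_corr : List Bool) (out : List String) : Prop := out = split_corr_trials_py_alt trial_corr
instance (trial_corr : List Bool) (out : List String) : Decidable (Spec_split_corr_trials_py trial_corr out) := by unfold Spec_split_corr_trials_py; infer_instance

-- ===== CLAIM (what is proved, stated in full; the proofs are below) =====
def Claim_equal_split_corr_trials_py : Prop := ∀ (trial_corr : List Bool), Dom_split_corr_trials_py trial_corr → Spec_split_corr_trials_py trial_corr (split_corr_trials_py trial_corr)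

-- ===== LEMMAS AND PROOFS =====

-- common reference: labels with starting counter i
def pvGo (i : Int) : List Bool → List String
  | [] => []
  | tc :: ts =>
      if tc then (if (i + 1) % 2 == 0 then "even" else "odd") :: pvGo (i + 1) ts
      else "error" :: pvGo i ts

-- prefix counts with starting counter c
def pvCountsFrom (c : Int) : List Bool → List Int
  | [] => []
  | tc :: ts => let c' := c + (if tc then 1 else 0); c' :: pvCountsFrom c' ts

lemma pvA_go (l : List Bool) : ∀ (i : Int) (acc : List String),
    (l.foldl (fun (st : Int × List String) tc =>
      if tc then
        let i := st.1 + 1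
        (i, st.2 ++ [if i % 2 == 0 then "even" else "odd"])
      else
        (st.1, st.2 ++ ["error"])) (i, acc)).2 = acc ++ pvGo i l := by
  induction l with
  | nil => intro i acc; simp [pvGo]
  | cons tc ts ih =>
      intro i acc
      by_cases h : tc
      · simp only [List.foldl_cons, h, ite_true, pvGo]
        rw [ih]; simp
      · simp only [List.foldl_cons, h, ite_false, Bool.false_eq_true, pvGo]
        rw [ih]; simp

lemma pvCounts_foldl (l : List Bool) : ∀ (c : Int) (acc : List Int),
    (l.foldl (fun (st : Int × List Int) tc =>
      let c := st.1 + (if tc then 1 else 0)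
      (c, st.2 ++ [c])) (c, acc)).2 = acc ++ pvCountsFrom c l := by
  induction l with
  | nil => intro c acc; simp [pvCountsFrom]
  | cons tc ts ih => intro c acc; simp [pvCountsFrom, ih]

lemma pvB_go (l : List Bool) : ∀ (c : Int),
    (l.zip (pvCountsFrom c l)).map (fun p =>
      if !p.1 then "error" else if p.2 % 2 == 0 then "even" else "odd") = pvGo c l := by
  induction l with
  | nil => intro c; simp [pvCountsFrom, pvGo]
  | cons tc ts ih =>
      intro c
      by_cases h : tc <;> simp [h, pvCountsFrom, pvGo] <;> simpa using ih _

-- ===== VERDICT (by name: the statement is the Claim_ definition above) =====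
theorem split_corr_trials_py_spec : Claim_equal_split_corr_trials_py := by
  intro l _
  unfold Spec_split_corr_trials_py split_corr_trials_py split_corr_trials_py_alt pvPrefixCounts
  rw [pvA_go, pvCounts_foldl, List.nil_append, List.nil_append, pvB_go]
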